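-- pv_equiv track=rewrite | github.com/darkknight001/JSP-pepcoding | DP/03-ClimbStairsVariableMoves.py | CSVT
-- ===== SOURCE A (Python) =====
-- def CSVT(n, moves):
--
--     # Storage and meaning
--     dp = [0]*(n+1)
--     dp[n] = 1
--
--     for i in range(n-1, -1, -1):
--         for j in range(1,moves[i]+1):
--             if i+j<=n:
--                 dp[i] += dp[i+j]
--     return dp[0]
-- ===== SOURCE B (Python) =====
-- def CSVT(n, moves):
--     # O(n) suffix-sum rewrite: suf[i] = dp[i] + dp[i+1] + ... + dp[n],
--     # so dp[i] = suf[i+1] - suf[i+k+1] with k = min(moves[i], n - i).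
--     suf = [0] * (n + 2)
--     suf[n] = 1
--     for i in range(n - 1, -1, -1):
--         k = moves[i]
--         if k > n - i:
--             k = n - i
--         dpi = suf[i + 1] - suf[i + k + 1] if k > 0 else 0
--         suf[i] = dpi + suf[i + 1]
--     return suf[0] - suf[1]
-- ===== Notes on version B (the rewrite author's own statement) =====
-- stated objective: faster
-- what changed: Replaces the nested loop (for each step i, summing dp[i+j] over j=1..moves[i]) by a single backward pass maintaining suffix sums, computing each dp[i] as a difference of two suffix-sum entries.
import Mathlib
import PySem

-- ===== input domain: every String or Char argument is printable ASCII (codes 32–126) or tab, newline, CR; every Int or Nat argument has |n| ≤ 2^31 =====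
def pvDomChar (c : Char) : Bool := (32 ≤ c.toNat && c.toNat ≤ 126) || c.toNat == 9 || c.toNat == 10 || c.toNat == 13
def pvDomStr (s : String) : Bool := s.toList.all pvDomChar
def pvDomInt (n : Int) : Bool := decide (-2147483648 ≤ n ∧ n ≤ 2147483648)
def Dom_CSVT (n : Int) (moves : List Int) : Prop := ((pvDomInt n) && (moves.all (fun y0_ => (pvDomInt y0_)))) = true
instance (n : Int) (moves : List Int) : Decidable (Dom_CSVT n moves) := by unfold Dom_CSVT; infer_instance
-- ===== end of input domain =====

-- B replaces A's nested summation loop by a single backward suffix-sum pass (asymptotically faster).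


-- ===== PORT A =====
-- body of A's outer loop (the inner 'for j in range(1, moves[i]+1)' loop with its 'if i+j<=n: dp[i] += dp[i+j]')
def CSVT_body (n : Int) (moves : List Int) (dp : List Int) (i : Int) : List Int :=
  (PySem.List.pyRange 1 (PySem.List.pyGetD moves i 0 + 1) 1).foldl
    (fun dp j => if i + j ≤ n then
        PySem.List.pySetD dp i (PySem.List.pyGetD dp i 0 + PySem.List.pyGetD dp (i + j) 0)
      else dp) dp

def CSVT (n : Int) (moves : List Int) : Int :=
  let dp := PySem.List.pySetD (List.replicate (n + 1).toNat (0 : Int)) n 1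
  let dp := (PySem.List.pyRange (n - 1) (-1) (-1)).foldl (CSVT_body n moves) dp
  PySem.List.pyGetD dp 0 0

-- ===== PORT B =====
-- body of B's single backward loop over i (k = min(moves[i], n-i); dp[i] as a suffix-sum difference)
def CSVT_alt_body (n : Int) (moves : List Int) (suf : List Int) (i : Int) : List Int :=
  let k := PySem.List.pyGetD moves i 0
  let k := if n - i < k then n - i else k
  let dpi := if 0 < k then
      PySem.List.pyGetD suf (i + 1) 0 - PySem.List.pyGetD suf (i + k + 1) 0
    else 0
  PySem.List.pySetD suf i (dpi + PySem.List.pyGetD suf (i + 1) 0)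

def CSVT_alt (n : Int) (moves : List Int) : Int :=
  let suf := PySem.List.pySetD (List.replicate (n + 2).toNat (0 : Int)) n 1
  let suf := (PySem.List.pyRange (n - 1) (-1) (-1)).foldl (CSVT_alt_body n moves) suf
  PySem.List.pyGetD suf 0 0 - PySem.List.pyGetD suf 1 0

-- ===== PRECONDITION & SPEC =====
-- A raises IndexError exactly when n < 0 (dp[n] on an empty list) or n > len(moves) (moves[i]); those inputs are excluded.
def Pre_CSVT (n : Int) (moves : List Int) : Prop := 0 ≤ n ∧ n ≤ (moves.length : Int)
instance (n : Int) (moves : List Int) : Decidable (Pre_CSVT n moves) := by unfold Pre_CSVT; infer_instance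
def pvWitness_CSVT : Int × List Int := (3, [2, 1, 2])

def Spec_CSVT (n : Int) (moves : List Int) (out : Int) : Prop := out = CSVT_alt n moves
instance (n : Int) (moves : List Int) (out : Int) : Decidable (Spec_CSVT n moves out) := by unfold Spec_CSVT; infer_instance

-- ===== CLAIM (what is proved, stated in full; the proofs are below) =====
def Claim_equal_CSVT : Prop := ∀ (n : Int) (moves : List Int), Dom_CSVT n moves → Pre_CSVT n moves → Spec_CSVT n moves (CSVT n moves)

-- ===== LEMMAS AND PROOFS =====

def pvS (dp : List Int) (a b : Nat) : Int := ∑ t ∈ Finset.Ico a b, dp.getD t 0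

def pvInv (N i : Nat) (dp suf : List Int) : Prop :=
  dp.length = N + 1 ∧ suf.length = N + 2 ∧
  (∀ j, j < i → dp.getD j 0 = 0) ∧
  (∀ j, i ≤ j → j ≤ N + 1 → suf.getD j 0 = pvS dp j (N + 1))

theorem CSVT_inner (n : Int) (i : Nat) :
    ∀ (L : List Int) (dp : List Int), (∀ j ∈ L, 1 ≤ j) → i < dp.length →
    L.foldl (fun dp j => if (i : Int) + j ≤ n then
        PySem.List.pySetD dp i (PySem.List.pyGetD dp i 0 + PySem.List.pyGetD dp ((i : Int) + j) 0)
      else dp) dp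
    = dp.set i (dp.getD i 0 + (L.map (fun j => if (i : Int) + j ≤ n then dp.getD (i + j.toNat) 0 else 0)).sum) := by
  intro L
  induction L with
  | nil =>
    intro dp _ hi
    simp only [List.foldl_nil, List.map_nil, List.sum_nil, add_zero]
    rw [List.getD_eq_getElem dp 0 hi, List.set_getElem_self]
  | cons j L ih =>
    intro dp hL hi
    have hj : 1 ≤ j := hL j (by simp)
    have hcast : (i : Int) + j = ((i + j.toNat : Nat) : Int) := by push_cast; omega
    simp only [List.foldl_cons]
    by_cases hc : (i : Int) + j ≤ n
    · rw [if_pos hc, hcast]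
      have hset : PySem.List.pySetD dp (i : Int) (PySem.List.pyGetD dp (i : Int) 0 + PySem.List.pyGetD dp ((i + j.toNat : Nat) : Int) 0)
          = dp.set i (dp.getD i 0 + dp.getD (i + j.toNat) 0) := by
        simp only [PySem.List.pySetD_natCast, PySem.List.pyGetD_natCast]
      rw [hset, ih _ (fun x hx => hL x (by simp [hx])) (by simpa using hi)]
      rw [List.set_set]
      congr 1
      have hget : (dp.set i (dp.getD i 0 + dp.getD (i + j.toNat) 0)).getD i 0
          = dp.getD i 0 + dp.getD (i + j.toNat) 0 := by
        simp [List.getD, hi]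
      rw [hget]
      have hmap : (L.map (fun j' => if (i : Int) + j' ≤ n then (dp.set i (dp.getD i 0 + dp.getD (i + j.toNat) 0)).getD (i + j'.toNat) 0 else 0))
          = L.map (fun j' => if (i : Int) + j' ≤ n then dp.getD (i + j'.toNat) 0 else 0) := by
        apply List.map_congr_left
        intro x hx
        have hx1 : 1 ≤ x := hL x (by simp [hx])
        have hne : i ≠ i + x.toNat := by omega
        by_cases h : (i : Int) + x ≤ n <;> simp [h, List.getD, List.getElem?_set_ne hne]
      rw [hmap]
      simp [hc]
      ring
    · rw [if_neg hc]
      rw [ih _ (fun x hx => hL x (by simp [hx])) hi]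
      simp [hc]

-- pvS ignores an entry set below the interval
theorem pvS_set_of_lt (dp : List Int) (v : Int) (i a b : Nat) (h : i < a) :
    pvS (dp.set i v) a b = pvS dp a b := by
  unfold pvS
  refine Finset.sum_congr rfl fun t ht => ?_
  have : i ≠ t := by have := (Finset.mem_Ico.1 ht).1; omega
  simp [List.getD, List.getElem?_set_ne this]

theorem CSVT_step (n : Int) (moves : List Int) (N : Nat) (hn : n = (N : Int)) (i : Nat) (hi : i < N)
    (dp suf : List Int) (h : pvInv N (i + 1) dp suf) :
    pvInv N i (CSVT_body n moves dp (i : Int)) (CSVT_alt_body n moves suf (i : Int)) := by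
  obtain ⟨hdl, hsl, hz, hs⟩ := h
  have hidp : i < dp.length := by omega
  have hisuf : i < suf.length := by omega
  set m : Int := moves.getD i 0 with hmdef
  set K : Nat := min m.toNat (N - i) with hK
  -- ===== A side =====
  have hA : CSVT_body n moves dp (i : Int)
      = dp.set i (pvS dp (i+1) (i+1+K)) := by
    unfold CSVT_body
    rw [show PySem.List.pyGetD moves (i : Int) 0 = m by simp [hmdef]]
    rw [CSVT_inner n i _ dp (fun j hj => ((PySem.List.mem_pyRange_one).1 hj).1) hidp]
    rw [hz i (by omega), zero_add]
    congr 1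
    -- sum over the python range equals the suffix-slice sum
    rw [PySem.List.pyRange_one]
    have h1 : ((m + 1) - 1).toNat = m.toNat := by omega
    rw [h1, List.map_map]
    have hbridge : ∀ (f : Nat → Int) (c : Nat), ((List.range c).map f).sum = ∑ k ∈ Finset.range c, f k :=
      fun _ _ => rfl
    rw [hbridge]
    simp only [Function.comp_apply]
    have hcongr : ∀ k ∈ Finset.range m.toNat,
        (if (i : Int) + (1 + (k : Int)) ≤ n then dp.getD (i + (1 + (k : Int)).toNat) 0 else 0)
        = (if i + 1 + k ≤ N then dp.getD (i + 1 + k) 0 else 0) := by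
      intro k _
      have hc : ((i : Int) + (1 + (k : Int)) ≤ n) ↔ (i + 1 + k ≤ N) := by
        rw [hn]; constructor <;> intro <;> omega
      have hidx : i + (1 + (k : Int)).toNat = i + 1 + k := by omega
      rw [hidx]
      by_cases hcc : i + 1 + k ≤ N
      · rw [if_pos (hc.2 hcc), if_pos hcc]
      · rw [if_neg (fun hh => hcc (hc.1 hh)), if_neg hcc]
    rw [Finset.sum_congr rfl hcongr]
    have hKle : K ≤ m.toNat := by omega
    rw [← Finset.sum_range_add_sum_Ico _ hKle]
    have hzero2 : ∑ k ∈ Finset.Ico K m.toNat, (if i + 1 + k ≤ N then dp.getD (i + 1 + k) 0 else 0) = 0 := by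
      refine Finset.sum_eq_zero fun k hk => ?_
      have h1 := (Finset.mem_Ico.1 hk).1
      have h2 := (Finset.mem_Ico.1 hk).2
      rw [if_neg (by omega)]
    rw [hzero2, add_zero]
    have hpos : ∀ k ∈ Finset.range K, (if i + 1 + k ≤ N then dp.getD (i + 1 + k) 0 else 0) = dp.getD (i + 1 + k) 0 := by
      intro k hk
      have := Finset.mem_range.1 hk
      rw [if_pos (by omega)]
    rw [Finset.sum_congr rfl hpos]
    unfold pvS
    rw [Finset.sum_Ico_eq_sum_range]
    have : i + 1 + K - (i + 1) = K := by omega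
    rw [this]
  -- ===== B side =====
  have hsufi1 : suf.getD (i+1) 0 = pvS dp (i+1) (N+1) := hs (i+1) (by omega) (by omega)
  have hdpi : CSVT_alt_body n moves suf (i : Int)
      = suf.set i (pvS dp (i+1) (i+1+K) + suf.getD (i+1) 0) := by
    simp only [CSVT_alt_body]
    rw [show PySem.List.pyGetD moves (i : Int) 0 = m by simp [hmdef]]
    have hni : n - (i : Int) = ((N - i : Nat) : Int) := by omega
    by_cases hc : n - (i : Int) < m
    · -- k = n - i = N - i > 0, K = N - i
      have hKeq : K = N - i := by omega
      rw [if_pos hc]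
      have hk0 : (0:Int) < n - (i : Int) := by omega
      rw [if_pos hk0]
      have e1 : (i : Int) + 1 = ((i + 1 : Nat) : Int) := by omega
      have e2 : (i : Int) + (n - (i : Int)) + 1 = ((i + 1 + K : Nat) : Int) := by omega
      rw [e1, e2]
      simp only [PySem.List.pyGetD_natCast, PySem.List.pySetD_natCast]
      congr 2
      rw [hs (i+1+K) (by omega) (by omega), hsufi1]
      have hsplit : pvS dp (i+1) (i+1+K) + pvS dp (i+1+K) (N+1) = pvS dp (i+1) (N+1) :=
        Finset.sum_Ico_consecutive _ (by omega) (by omega)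
      omega
    · -- k = m
      rw [if_neg hc]
      by_cases hp : (0:Int) < m
      · have hKeq : K = m.toNat := by omega
        rw [if_pos hp]
        have e1 : (i : Int) + 1 = ((i + 1 : Nat) : Int) := by omega
        have e2 : (i : Int) + m + 1 = ((i + 1 + K : Nat) : Int) := by omega
        rw [e1, e2]
        simp only [PySem.List.pyGetD_natCast, PySem.List.pySetD_natCast]
        congr 2
        rw [hs (i+1+K) (by omega) (by omega), hsufi1]
        have hsplit : pvS dp (i+1) (i+1+K) + pvS dp (i+1+K) (N+1) = pvS dp (i+1) (N+1) :=
          Finset.sum_Ico_consecutive _ (by omega) (by omega)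
        omega
      · have hKeq : K = 0 := by omega
        rw [if_neg hp]
        have e1 : (i : Int) + 1 = ((i + 1 : Nat) : Int) := by omega
        rw [e1]
        simp only [PySem.List.pyGetD_natCast, PySem.List.pySetD_natCast]
        congr 2
        rw [hKeq]
        unfold pvS
        simp
  -- ===== assemble the invariant =====
  rw [hA, hdpi]
  refine ⟨by simp [hdl], by simp [hsl], ?_, ?_⟩
  · intro j hj
    have : i ≠ j := by omega
    rw [List.getD, List.getElem?_set_ne this]
    exact hz j (by omega)
  · intro j hj1 hj2
    rcases Nat.eq_or_lt_of_le hj1 with hji | hji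
    · -- j = i
      subst hji
      have hsetget : (suf.set i (pvS dp (i+1) (i+1+K) + suf.getD (i+1) 0)).getD i 0
          = pvS dp (i+1) (i+1+K) + suf.getD (i+1) 0 := by simp [List.getD, hisuf]
      rw [hsetget, hsufi1]
      have hrhs : pvS (dp.set i (pvS dp (i+1) (i+1+K))) i (N+1)
          = pvS dp (i+1) (i+1+K) + pvS dp (i+1) (N+1) := by
        unfold pvS
        rw [Finset.sum_eq_sum_Ico_succ_bot (by omega : i < N+1)]
        congr 1
        · simp [List.getD, hidp]
        · exact pvS_set_of_lt dp _ i (i+1) (N+1) (by omega)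
      rw [hrhs]
    · -- i < j
      have hne : i ≠ j := by omega
      rw [List.getD, List.getElem?_set_ne hne, pvS_set_of_lt dp _ i j _ hji]
      exact hs j (by omega) (by omega)

theorem CSVT_loop (n : Int) (moves : List Int) (N : Nat) (hn : n = (N : Int)) :
    ∀ (i : Nat), i ≤ N → ∀ dp suf, pvInv N i dp suf →
    pvInv N 0 ((PySem.List.pyRange ((i : Int) - 1) (-1) (-1)).foldl (CSVT_body n moves) dp)
              ((PySem.List.pyRange ((i : Int) - 1) (-1) (-1)).foldl (CSVT_alt_body n moves) suf) := by
  intro i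
  induction i with
  | zero =>
    intro _ dp suf h
    rw [PySem.List.pyRange_neg_one_eq_nil (by omega)]
    simpa using h
  | succ i ih =>
    intro hle dp suf h
    rw [PySem.List.pyRange_neg_one_cons (by omega : (-1 : Int) < ((i + 1 : Nat) : Int) - 1)]
    have e : ((i + 1 : Nat) : Int) - 1 = (i : Int) := by omega
    simp only [List.foldl_cons, e]
    exact ih (by omega) _ _ (CSVT_step n moves N hn i (by omega) dp suf h)

theorem CSVT_main (n : Int) (moves : List Int) (h0 : 0 ≤ n) :
    (let dp := PySem.List.pySetD (List.replicate (n + 1).toNat (0 : Int)) n 1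
     let dp := (PySem.List.pyRange (n - 1) (-1) (-1)).foldl (CSVT_body n moves) dp
     PySem.List.pyGetD dp 0 0)
    = (let suf := PySem.List.pySetD (List.replicate (n + 2).toNat (0 : Int)) n 1
       let suf := (PySem.List.pyRange (n - 1) (-1) (-1)).foldl (CSVT_alt_body n moves) suf
       PySem.List.pyGetD suf 0 0 - PySem.List.pyGetD suf 1 0) := by
  set N : Nat := n.toNat with hN
  have hn : n = (N : Int) := by omega
  have e1 : (n + 1).toNat = N + 1 := by omega
  have e2 : (n + 2).toNat = N + 2 := by omega
  simp only [e1, e2]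
  rw [hn]
  simp only [PySem.List.pySetD_natCast]
  have hinv : pvInv N N ((List.replicate (N + 1) (0 : Int)).set N 1)
      ((List.replicate (N + 2) (0 : Int)).set N 1) := by
    refine ⟨by simp, by simp, ?_, ?_⟩
    · intro j hj
      have hne : N ≠ j := by omega
      rw [List.getD, List.getElem?_set_ne hne, List.getElem?_replicate, if_pos (by omega)]
      rfl
    · intro j hj1 hj2
      rcases Nat.eq_or_lt_of_le hj1 with hje | hje
      · -- j = N
        rw [← hje]
        have hg : ((List.replicate (N + 2) (0 : Int)).set N 1).getD N 0 = 1 := by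
          simp [List.getD]
        rw [hg]
        unfold pvS
        rw [Nat.Ico_succ_singleton, Finset.sum_singleton]
        simp [List.getD]
      · -- j = N + 1
        have hje' : j = N + 1 := by omega
        subst hje'
        have hne : N ≠ N + 1 := by omega
        have hg : ((List.replicate (N + 2) (0 : Int)).set N 1).getD (N+1) 0 = 0 := by
          rw [List.getD, List.getElem?_set_ne hne, List.getElem?_replicate, if_pos (by omega)]
          rfl
        rw [hg]
        unfold pvS
        simp
  have hfin := CSVT_loop ((N : Int)) moves N rfl N (le_refl N) _ _ hinv
  obtain ⟨hdl, hsl, _, hs⟩ := hfin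
  set dpF := (PySem.List.pyRange ((N : Int) - 1) (-1) (-1)).foldl (CSVT_body ((N : Int)) moves)
      ((List.replicate (N + 1) (0 : Int)).set N 1) with hdpF
  set sufF := (PySem.List.pyRange ((N : Int) - 1) (-1) (-1)).foldl (CSVT_alt_body ((N : Int)) moves)
      ((List.replicate (N + 2) (0 : Int)).set N 1) with hsufF
  have hone : (1 : Int) = ((1 : Nat) : Int) := rfl
  rw [PySem.List.pyGetD_zero, PySem.List.pyGetD_zero, hone, PySem.List.pyGetD_natCast]
  have h0' : sufF.getD 0 0 = pvS dpF 0 (N + 1) := hs 0 (by omega) (by omega)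
  have h1' : sufF.getD 1 0 = pvS dpF 1 (N + 1) := hs 1 (by omega) (by omega)
  have hsplit : pvS dpF 0 1 + pvS dpF 1 (N + 1) = pvS dpF 0 (N + 1) :=
    Finset.sum_Ico_consecutive _ (by omega) (by omega)
  have hd0 : pvS dpF 0 1 = dpF.getD 0 0 := by
    unfold pvS
    rw [Nat.Ico_succ_singleton, Finset.sum_singleton]
  omega

-- ===== VERDICT (by name: the statement is the Claim_ definition above) =====
theorem CSVT_spec : Claim_equal_CSVT := by
  intro n moves _ hpre
  unfold Spec_CSVT CSVT CSVT_alt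
  exact CSVT_main n moves hpre.1
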